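-- pv_equiv track=rewrite | github.com/yellowredish/find_maze | RMG.py | bfs
-- ===== SOURCE A (Python) =====
-- from collections import deque
--
-- def bfs(x, y, miro, n):
--     dx = [-1, 1, 0, 0]
--     dy = [0, 0, -1, 1]
--     q = deque()
--     q.append([x, y])
--
--     visited = [[0 for _ in range(n + 2)] for _ in range(n + 2)]
--     visited[x][y] = 1  # 시작 지점을 방문한 것으로 마크
--
--     while q:
--         x, y = q.popleft()
--         if x == n and y == n:
--             return True
--         for i in range(4):
--             nx = x + dx[i]
--             ny = y + dy[i]
--             if 1 <= nx <= n and 1 <= ny <= n and visited[nx][ny] == 0 and miro[nx][ny] != 5: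
--                 visited[nx][ny] = 1  # 이동한 부분 마크
--                 q.append([nx, ny])
--     return False
-- ===== SOURCE B (Python) =====
-- def bfs(x, y, miro, n):
--     # Round-based saturation (fixpoint closure) instead of a BFS queue:
--     # seed with the passable in-bounds neighbours of the start, then sweep the
--     # whole grid, adding any passable cell adjacent to the reached set, until a
--     # sweep changes nothing.  Finally test whether the corner (n, n) was reached.
--     if x == n and y == n:
--         return True
--     steps = ((-1, 0), (1, 0), (0, -1), (0, 1))
--
--     def ok(i, j):
--         return 1 <= i <= n and 1 <= j <= n and miro[i][j] != 5
--
--     reach = set()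
--     for di, dj in steps:
--         if ok(x + di, y + dj):
--             reach.add((x + di, y + dj))
--     for _ in range(n * n + 1):  # one sweep per cell suffices, plus one to detect closure
--         changed = False
--         for i in range(1, n + 1):
--             for j in range(1, n + 1):
--                 if (i, j) not in reach and any((i + di, j + dj) in reach for di, dj in steps) and miro[i][j] != 5:
--                     reach.add((i, j))
--                     changed = True
--         if not changed:
--             break
--     return (n, n) in reach
-- ===== Notes on version B (the rewrite author's own statement) =====
-- stated objective: alternative
-- what changed: Replaces the BFS queue/visited-matrix wavefront by round-based saturation: seed a reached-set with the passable in-bounds neighbours of the start, then repeatedly sweep the whole grid adding any passable cell adjacent to the set until a sweep changes nothing, and finally test membership of the corner (n,n).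
-- outside the precondition, e.g. on bfs(1, 2, [[], [0, 5], [0, 0, 0]], 2): A returns True, B raises IndexError
import Mathlib
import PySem

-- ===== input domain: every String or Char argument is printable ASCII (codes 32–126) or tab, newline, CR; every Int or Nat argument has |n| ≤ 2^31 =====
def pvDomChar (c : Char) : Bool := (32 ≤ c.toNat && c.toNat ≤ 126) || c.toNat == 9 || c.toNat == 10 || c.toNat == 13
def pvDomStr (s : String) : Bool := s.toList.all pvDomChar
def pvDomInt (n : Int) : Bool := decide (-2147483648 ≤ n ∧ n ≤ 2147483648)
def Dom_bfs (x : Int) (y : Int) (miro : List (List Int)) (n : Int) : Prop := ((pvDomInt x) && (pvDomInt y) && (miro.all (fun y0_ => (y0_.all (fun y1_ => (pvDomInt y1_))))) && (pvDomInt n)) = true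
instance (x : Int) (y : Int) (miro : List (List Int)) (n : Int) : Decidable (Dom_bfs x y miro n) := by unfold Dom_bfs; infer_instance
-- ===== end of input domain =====

-- B replaces the BFS queue by round-based saturation of a reached set (sweep the grid until a
-- sweep adds nothing); same return value on Pre_, objective: alternative (not faster).

-- ===== PORT A =====
-- miro[i][j]; exact where the indices are in range (guaranteed inside Pre_; Python raises outside)
def pvCellA (miro : List (List Int)) (i j : Int) : Int :=
  PySem.List.pyGetD ((PySem.List.pyGet? miro i).getD []) j 0

-- visited[i][j]; exact where in range (the port only reads/writes in-range cells inside Pre_)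
def pvGet2 (v : List (List Int)) (i j : Int) : Int :=
  PySem.List.pyGetD (PySem.List.pyGetD v i []) j 0

-- visited[i][j] = c
def pvSet2 (v : List (List Int)) (i j : Int) (c : Int) : List (List Int) :=
  PySem.List.pySetD v i (PySem.List.pySetD (PySem.List.pyGetD v i []) j c)

-- the 'while q:' loop; fuel only totalizes it (the queue is popped at most once per marked
-- cell, so 2*(n+2)^2+1 steps are proved below never to run out inside Pre_)
def pvLoopA (miro : List (List Int)) (n : Int) :
    Nat → List (List Int) → List (Int × Int) → Bool
  | 0, _, _ => false
  | fuel + 1, v, q =>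
    match q with
    | [] => false
    | (cx, cy) :: rest =>
      if cx = n ∧ cy = n then true
      else
        let st := (PySem.List.pyRange 0 4 1).foldl
          (fun (st : List (List Int) × List (Int × Int)) i =>
            let nx := cx + PySem.List.pyGetD [(-1 : Int), 1, 0, 0] i 0
            let ny := cy + PySem.List.pyGetD [(0 : Int), 0, -1, 1] i 0
            if 1 ≤ nx ∧ nx ≤ n ∧ 1 ≤ ny ∧ ny ≤ n ∧
                pvGet2 st.1 nx ny = 0 ∧ pvCellA miro nx ny ≠ 5
            then (pvSet2 st.1 nx ny 1, st.2 ++ [(nx, ny)])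
            else st)
          (v, rest)
        pvLoopA miro n fuel st.1 st.2

def bfs (x : Int) (y : Int) (miro : List (List Int)) (n : Int) : Bool :=
  let v0 := pvSet2 (List.replicate (n + 2).toNat (List.replicate (n + 2).toNat 0)) x y 1
  pvLoopA miro n (2 * (n + 2) * (n + 2) + 1).toNat v0 [(x, y)]

-- ===== PORT B =====
def pvCellB (miro : List (List Int)) (i j : Int) : Int :=
  match PySem.List.pyGet? miro i with
  | some r => PySem.List.pyGetD r j 0
  | none => PySem.List.pyGetD [] j 0

def pvSteps : List (Int × Int) := [(-1, 0), (1, 0), (0, -1), (0, 1)]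

def pvOkB (miro : List (List Int)) (n i j : Int) : Bool :=
  decide (1 ≤ i) && decide (i ≤ n) && decide (1 ≤ j) && decide (j ≤ n) &&
    (pvCellB miro i j != 5)

def pvSweepCell (miro : List (List Int)) (n : Int)
    (st : List (Int × Int) × Bool) (c : Int × Int) : List (Int × Int) × Bool :=
  if !(st.1.contains c) &&
      pvSteps.any (fun d => st.1.contains (c.1 + d.1, c.2 + d.2)) &&
      (pvCellB miro c.1 c.2 != 5)
  then (PySem.Set.add st.1 c, true)
  else st

-- one full sweep over the grid; the Bool is Python's 'changed' flag
def pvSweep (miro : List (List Int)) (n : Int) (S : List (Int × Int)) :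
    List (Int × Int) × Bool :=
  (PySem.List.pyRange 1 (n + 1) 1).foldl
    (fun st i =>
      (PySem.List.pyRange 1 (n + 1) 1).foldl
        (fun st j => pvSweepCell miro n st (i, j)) st)
    (S, false)

def pvLoopB (miro : List (List Int)) (n : Int) : Nat → List (Int × Int) → List (Int × Int)
  | 0, S => S
  | fuel + 1, S =>
    let r := pvSweep miro n S
    if r.2 then pvLoopB miro n fuel r.1 else r.1

def bfs_alt (x : Int) (y : Int) (miro : List (List Int)) (n : Int) : Bool :=
  if x = n ∧ y = n then true
  else
    let seed := pvSteps.foldl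
      (fun (S : List (Int × Int)) d =>
        if pvOkB miro n (x + d.1) (y + d.2) then PySem.Set.add S (x + d.1, y + d.2) else S)
      []
    let reach := pvLoopB miro n (n * n + 1).toNat seed
    decide ((n, n) ∈ reach)

-- ===== PRECONDITION & SPEC =====
-- Pre_ keeps the inputs on which Python A returns normally and its behaviour is the function's:
-- start coordinates in the index range Python accepts for visited (so visited[x][y] does not
-- raise, n ≥ -1), and either a well-formed grid (more than n rows, rows 1..n with at least n+1
-- entries) or a start from which the search provably touches no grid cell (start = target, a
-- negative or boundary-corner start, or n ≤ 0).  It excludes malformed grids on which A happens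
-- to return only because its BFS never reaches the missing cells (B sweeps the whole grid and
-- raises IndexError there).
def Pre_bfs (x : Int) (y : Int) (miro : List (List Int)) (n : Int) : Prop :=
  -1 ≤ n ∧ -(n + 2) ≤ x ∧ x ≤ n + 1 ∧ -(n + 2) ≤ y ∧ y ≤ n + 1 ∧
  ((x = n ∧ y = n) ∨
   (x < 0 ∨ y < 0 ∨ n ≤ 0 ∨ ((x = 0 ∨ x = n + 1) ∧ (y = 0 ∨ y = n + 1))) ∨
   (n < (miro.length : Int) ∧
    ∀ r ∈ (miro.drop 1).take n.toNat, n + 1 ≤ (r.length : Int)))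

instance (x : Int) (y : Int) (miro : List (List Int)) (n : Int) : Decidable (Pre_bfs x y miro n) := by
  unfold Pre_bfs; infer_instance

def pvWitness_bfs : Int × Int × List (List Int) × Int := (1, 1, [[0, 0], [0, 0]], 1)

def Spec_bfs (x : Int) (y : Int) (miro : List (List Int)) (n : Int) (out : Bool) : Prop := out = bfs_alt x y miro n
instance (x : Int) (y : Int) (miro : List (List Int)) (n : Int) (out : Bool) : Decidable (Spec_bfs x y miro n out) := by unfold Spec_bfs; infer_instance

-- ===== CLAIM (what is proved, stated in full; the proofs are below) =====
def Claim_equal_bfs : Prop := ∀ (x : Int) (y : Int) (miro : List (List Int)) (n : Int), Dom_bfs x y miro n → Pre_bfs x y miro n → Spec_bfs x y miro n (bfs x y miro n)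

-- ===== LEMMAS AND PROOFS =====

-- the cells of the maze proper
def pvInGrid (n : Int) (c : Int × Int) : Prop :=
  1 ≤ c.1 ∧ c.1 ≤ n ∧ 1 ≤ c.2 ∧ c.2 ≤ n

-- starts from which neither port ever inspects a grid cell
def pvDegen (x y n : Int) : Prop :=
  x < 0 ∨ y < 0 ∨ n ≤ 0 ∨ ((x = 0 ∨ x = n + 1) ∧ (y = 0 ∨ y = n + 1))

-- passable in-grid cell (both guards reduce to this; pvCellA and pvCellB are definitionally equal)
def pvOk (miro : List (List Int)) (n : Int) (c : Int × Int) : Prop :=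
  pvInGrid n c ∧ pvCellA miro c.1 c.2 ≠ 5

def pvNbrs (c : Int × Int) : List (Int × Int) :=
  pvSteps.map (fun d => (c.1 + d.1, c.2 + d.2))

-- cells reachable from a member of q by steps into passable in-grid cells
inductive pvReach (miro : List (List Int)) (n : Int) (q : List (Int × Int)) :
    (Int × Int) → Prop
  | base (c : Int × Int) (h : c ∈ q) : pvReach miro n q c
  | step (c d : Int × Int) (hc : pvReach miro n q c) (hd : d ∈ pvNbrs c)
      (hok : pvOk miro n d) : pvReach miro n q d

-- ---------- generic facts about cells / neighbours ----------

theorem pvMem_nbrs (c d : Int × Int) :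
    d ∈ pvNbrs c ↔ ∃ s ∈ pvSteps, d = (c.1 + s.1, c.2 + s.2) := by
  simp [pvNbrs, eq_comm]

theorem pvNbrs_symm (c d : Int × Int) (h : d ∈ pvNbrs c) : c ∈ pvNbrs d := by
  simp [pvNbrs, pvSteps] at h ⊢
  rcases h with h | h | h | h <;> subst h <;> simp

theorem pvReach_nil (miro : List (List Int)) (n : Int) (c : Int × Int) :
    ¬ pvReach miro n [] c := by
  intro h
  induction h with
  | base c h => simp at h
  | step c d hc hd hok ih => exact ih

theorem pvReach_mono (miro : List (List Int)) (n : Int) (q q' : List (Int × Int))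
    (h : ∀ e ∈ q, pvReach miro n q' e) (d : Int × Int) (hd : pvReach miro n q d) :
    pvReach miro n q' d := by
  induction hd with
  | base c hc => exact h c hc
  | step c d hc hdn hok ih => exact pvReach.step c d ih hdn hok

-- ---------- A-side primitives ----------

def pvZeros (v : List (List Int)) : Nat := (v.map (fun r => r.count 0)).sum

def pvShape (n : Int) (v : List (List Int)) : Prop :=
  v.length = (n + 2).toNat ∧ ∀ r ∈ v, r.length = (n + 2).toNat

def pvBin (v : List (List Int)) : Prop := ∀ r ∈ v, ∀ z ∈ r, z = 0 ∨ z = 1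

theorem pvNotInRange_zero (i : Int) : ¬ PySem.Raise.InRange 0 i := by
  simp [PySem.Raise.InRange]

theorem pvBin_get (v : List (List Int)) (hb : pvBin v) (i j : Int) :
    pvGet2 v i j = 0 ∨ pvGet2 v i j = 1 := by
  unfold pvGet2
  by_cases h1 : PySem.Raise.InRange v.length i
  · have hr := PySem.List.pyGetD_mem v ([] : List Int) h1
    by_cases h2 : PySem.Raise.InRange (PySem.List.pyGetD v i []).length j
    · exact hb _ hr _ (PySem.List.pyGetD_mem _ (0 : Int) h2)
    · exact Or.inl (PySem.List.pyGetD_of_none _ j 0 ((PySem.List.pyGet?_eq_none_iff _ j).2 h2))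
  · rw [PySem.List.pyGetD_of_none v i [] ((PySem.List.pyGet?_eq_none_iff v i).2 h1)]
    exact Or.inl (PySem.List.pyGetD_of_none [] j 0
      ((PySem.List.pyGet?_eq_none_iff [] j).2 (by simpa using pvNotInRange_zero j)))

theorem pvGet2_set2 (n : Int) (hn : 1 ≤ n) (v : List (List Int)) (hs : pvShape n v)
    (i j a b c : Int) (hi : 0 ≤ i) (hi' : i ≤ n + 1) (hj : 0 ≤ j) (hj' : j ≤ n + 1)
    (ha : 0 ≤ a) (ha' : a ≤ n + 1) (hb : 0 ≤ b) (hb' : b ≤ n + 1) :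
    pvGet2 (pvSet2 v i j c) a b = if a = i ∧ b = j then c else pvGet2 v a b := by
  obtain ⟨hl, hrows⟩ := hs
  lift i to ℕ using hi with iN
  lift j to ℕ using hj with jN
  lift a to ℕ using ha with aN
  lift b to ℕ using hb with bN
  have hvlen : (v.length : Int) = n + 2 := by rw [hl]; omega
  have hiN : iN < v.length := by omega
  have hrow : PySem.List.pyGetD v (iN : Int) [] = v[iN] := by
    rw [PySem.List.pyGetD_natCast]
    exact List.getD_eq_getElem _ _ hiN
  have hrl : (v[iN].length : Int) = n + 2 := by
    rw [hrows _ (List.getElem_mem hiN)]; omega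
  have hjN : jN < v[iN].length := by omega
  unfold pvSet2 pvGet2
  rw [hrow]
  rw [PySem.List.pyGetD_pySetD_natCast v iN aN _ [] hiN]
  by_cases hai : aN = iN
  · rw [if_pos hai, hai]
    rw [PySem.List.pyGetD_pySetD_natCast _ jN bN c 0 hjN]
    by_cases hbj : bN = jN
    · rw [if_pos hbj, if_pos ⟨by omega, by omega⟩]
    · rw [if_neg hbj, if_neg (by intro h; exact hbj (by omega)), hrow]
  · rw [if_neg hai, if_neg (by intro h; exact hai (by omega))]

theorem pvShape_set2 (n : Int) (hn : 1 ≤ n) (v : List (List Int)) (hs : pvShape n v)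
    (i j c : Int) (hi : 0 ≤ i) (hi' : i ≤ n + 1) (hj : 0 ≤ j) :
    pvShape n (pvSet2 v i j c) := by
  obtain ⟨hl, hrows⟩ := hs
  have hvlen : (v.length : Int) = n + 2 := by rw [hl]; omega
  have hiN : i.toNat < v.length := by omega
  have hrow : PySem.List.pyGetD v i [] = v[i.toNat] :=
    PySem.List.pyGetD_eq_getElem v [] hi (by omega)
  unfold pvSet2
  rw [PySem.List.pySetD_of_nonneg v _ hi, hrow, PySem.List.pySetD_of_nonneg _ _ hj]
  refine ⟨by simpa using hl, ?_⟩
  intro r hr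
  rcases List.mem_or_eq_of_mem_set hr with h | h
  · exact hrows r h
  · subst h
    rw [List.length_set]
    exact hrows _ (List.getElem_mem hiN)

theorem pvBin_set2 (v : List (List Int)) (hb : pvBin v) (i j : Int)
    (hi : 0 ≤ i) (hj : 0 ≤ j) : pvBin (pvSet2 v i j 1) := by
  unfold pvSet2
  rw [PySem.List.pySetD_of_nonneg v _ hi, PySem.List.pySetD_of_nonneg _ _ hj]
  intro r hr z hz
  rcases List.mem_or_eq_of_mem_set hr with h | h
  · exact hb r h z hz
  · subst h
    rcases List.mem_or_eq_of_mem_set hz with h' | h'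
    · by_cases hir : PySem.Raise.InRange v.length i
      · exact hb _ (PySem.List.pyGetD_mem v ([] : List Int) hir) z h'
      · rw [PySem.List.pyGetD_of_none v i [] ((PySem.List.pyGet?_eq_none_iff v i).2 hir)] at h'
        simp at h'
    · exact Or.inr h'

theorem pvZeros_set2 (n : Int) (hn : 1 ≤ n) (v : List (List Int)) (hs : pvShape n v)
    (i j : Int) (hi : 0 ≤ i) (hi' : i ≤ n + 1) (hj : 0 ≤ j) (hj' : j ≤ n + 1)
    (h0 : pvGet2 v i j = 0) :
    pvZeros (pvSet2 v i j 1) + 1 = pvZeros v := by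
  obtain ⟨hl, hrows⟩ := hs
  have hvlen : (v.length : Int) = n + 2 := by rw [hl]; omega
  have hiN : i.toNat < v.length := by omega
  have hrow : PySem.List.pyGetD v i [] = v[i.toNat] :=
    PySem.List.pyGetD_eq_getElem v [] hi (by omega)
  have hrl : (v[i.toNat].length : Int) = n + 2 := by
    rw [hrows _ (List.getElem_mem hiN)]; omega
  have hjN : j.toNat < v[i.toNat].length := by omega
  have hentry : v[i.toNat][j.toNat] = 0 := by
    unfold pvGet2 at h0
    rw [hrow, PySem.List.pyGetD_eq_getElem _ (0 : Int) hj (by omega)] at h0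
    exact h0
  unfold pvSet2 pvZeros
  rw [PySem.List.pySetD_of_nonneg v _ hi, hrow, PySem.List.pySetD_of_nonneg _ _ hj]
  rw [List.map_set]
  have hcount : (v[i.toNat].set j.toNat 1).count 0 + 1 = v[i.toNat].count 0 := by
    rw [List.count_set hjN]
    have hc1 : 1 ≤ v[i.toNat].count 0 := List.count_pos_iff.2 (hentry ▸ List.getElem_mem hjN)
    simp [hentry]
    omega
  set L := v.map (fun r => r.count 0) with hL
  have hLi : i.toNat < L.length := by simpa [hL]
  have hgl : L[i.toNat] = v[i.toNat].count 0 := by simp [hL]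
  rw [List.sum_set]
  have hsplit : L.sum = ((L.take i.toNat).sum + L[i.toNat]) + (L.drop (i.toNat + 1)).sum := by
    conv_lhs => rw [← List.set_getElem_self (as := L) (i := i.toNat) hLi]
    rw [List.sum_set]
    simp [hLi]
  rw [hsplit, hgl]
  simp [hLi]
  omega

theorem pvZeros_le (n : Int) (v : List (List Int)) (hs : pvShape n v) :
    pvZeros v ≤ (n + 2).toNat * (n + 2).toNat := by
  obtain ⟨hl, hrows⟩ := hs
  unfold pvZeros
  calc (v.map (fun r => r.count 0)).sum
      ≤ (v.map (fun r => r.count 0)).length * (n + 2).toNat := by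
        apply List.sum_le_card_nsmul
        intro x hx
        simp at hx
        obtain ⟨r, hr, rfl⟩ := hx
        exact le_trans (List.count_le_length) (le_of_eq (hrows r hr))
    _ = (n + 2).toNat * (n + 2).toNat := by simp [hl]

theorem pvGet2_replicate (N : Nat) (a b : Int) :
    pvGet2 (List.replicate N (List.replicate N 0)) a b = 0 := by
  unfold pvGet2
  by_cases h1 : PySem.Raise.InRange (List.replicate N (List.replicate N (0 : Int))).length a
  · have hr := PySem.List.pyGetD_mem (List.replicate N (List.replicate N (0 : Int))) [] h1
    rw [List.eq_of_mem_replicate hr]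
    by_cases h2 : PySem.Raise.InRange (List.replicate N (0 : Int)).length b
    · exact List.eq_of_mem_replicate (PySem.List.pyGetD_mem _ (0 : Int) h2)
    · exact PySem.List.pyGetD_of_none _ b 0 ((PySem.List.pyGet?_eq_none_iff _ b).2 h2)
  · rw [PySem.List.pyGetD_of_none _ a [] ((PySem.List.pyGet?_eq_none_iff _ a).2 h1)]
    exact PySem.List.pyGetD_of_none [] b 0
      ((PySem.List.pyGet?_eq_none_iff [] b).2 (by simpa using pvNotInRange_zero b))

-- ---------- A-side loop ----------

def pvMarked (v : List (List Int)) (c : Int × Int) : Prop := pvGet2 v c.1 c.2 = 1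

def pvInvA (miro : List (List Int)) (n : Int) (v : List (List Int))
    (q : List (Int × Int)) : Prop :=
  pvShape n v ∧ pvBin v ∧
  (∀ c, pvInGrid n c → pvMarked v c → c ∉ q →
    ∀ d ∈ pvNbrs c, pvOk miro n d → pvMarked v d) ∧
  (∀ c ∈ q, pvInGrid n c → pvMarked v c) ∧
  (pvMarked v (n, n) → (n, n) ∈ q)

-- one neighbour step of port A, over an explicit offset
def pvStepA (miro : List (List Int)) (n cx cy : Int)
    (st : List (List Int) × List (Int × Int)) (d : Int × Int) :
    List (List Int) × List (Int × Int) :=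
  if 1 ≤ cx + d.1 ∧ cx + d.1 ≤ n ∧ 1 ≤ cy + d.2 ∧ cy + d.2 ≤ n ∧
      pvGet2 st.1 (cx + d.1) (cy + d.2) = 0 ∧ pvCellA miro (cx + d.1) (cy + d.2) ≠ 5
  then (pvSet2 st.1 (cx + d.1) (cy + d.2) 1, st.2 ++ [(cx + d.1, cy + d.2)])
  else st

-- the 4-neighbour fold of port A, rewritten over the explicit offset list (definitional)
theorem pvFoldA_eq (miro : List (List Int)) (n cx cy : Int)
    (st : List (List Int) × List (Int × Int)) :
    (PySem.List.pyRange 0 4 1).foldl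
      (fun (st : List (List Int) × List (Int × Int)) i =>
        let nx := cx + PySem.List.pyGetD [(-1 : Int), 1, 0, 0] i 0
        let ny := cy + PySem.List.pyGetD [(0 : Int), 0, -1, 1] i 0
        if 1 ≤ nx ∧ nx ≤ n ∧ 1 ≤ ny ∧ ny ≤ n ∧
            pvGet2 st.1 nx ny = 0 ∧ pvCellA miro nx ny ≠ 5
        then (pvSet2 st.1 nx ny 1, st.2 ++ [(nx, ny)])
        else st) st
    = pvSteps.foldl (pvStepA miro n cx cy) st := by
  rfl

theorem pvStepFold_spec (miro : List (List Int)) (n : Int) (hn : 1 ≤ n) (cx cy : Int) :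
    ∀ (ds : List (Int × Int)), (∀ d ∈ ds, d ∈ pvSteps) →
    ∀ (v : List (List Int)) (q : List (Int × Int)), pvShape n v → pvBin v →
    ∃ new : List (Int × Int),
      (ds.foldl (pvStepA miro n cx cy) (v, q)).2 = q ++ new ∧
      pvShape n (ds.foldl (pvStepA miro n cx cy) (v, q)).1 ∧
      pvBin (ds.foldl (pvStepA miro n cx cy) (v, q)).1 ∧
      (∀ a : Int × Int, pvInGrid n a →
        (pvMarked (ds.foldl (pvStepA miro n cx cy) (v, q)).1 a ↔ pvMarked v a ∨ a ∈ new)) ∧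
      (∀ a ∈ new, pvOk miro n a ∧ a ∈ pvNbrs (cx, cy)) ∧
      (∀ d ∈ ds, pvOk miro n (cx + d.1, cy + d.2) →
        pvMarked (ds.foldl (pvStepA miro n cx cy) (v, q)).1 (cx + d.1, cy + d.2)) ∧
      2 * pvZeros (ds.foldl (pvStepA miro n cx cy) (v, q)).1
        + (ds.foldl (pvStepA miro n cx cy) (v, q)).2.length
        ≤ 2 * pvZeros v + q.length := by
  intro ds
  induction ds with
  | nil =>
    intro _ v q hs hb
    exact ⟨[], by simp, hs, hb, fun a _ => by simp, by simp, by simp, by simp⟩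
  | cons d ds ih =>
    intro hds v q hs hb
    have hdstep : d ∈ pvSteps := hds d (by simp)
    have hds' : ∀ e ∈ ds, e ∈ pvSteps := fun e he => hds e (by simp [he])
    set c' : Int × Int := (cx + d.1, cy + d.2) with hc'
    by_cases hg : 1 ≤ cx + d.1 ∧ cx + d.1 ≤ n ∧ 1 ≤ cy + d.2 ∧ cy + d.2 ≤ n ∧
        pvGet2 v (cx + d.1) (cy + d.2) = 0 ∧ pvCellA miro (cx + d.1) (cy + d.2) ≠ 5
    · obtain ⟨h1, h2, h3, h4, h5, h6⟩ := hg
      have hstep : pvStepA miro n cx cy (v, q) d =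
          (pvSet2 v (cx + d.1) (cy + d.2) 1, q ++ [c']) := by
        unfold pvStepA
        rw [if_pos ⟨h1, h2, h3, h4, h5, h6⟩]
      have hb1 : 0 ≤ cx + d.1 := by omega
      have hb2 : cx + d.1 ≤ n + 1 := by omega
      have hb3 : 0 ≤ cy + d.2 := by omega
      have hb4 : cy + d.2 ≤ n + 1 := by omega
      set v' := pvSet2 v (cx + d.1) (cy + d.2) 1 with hv'
      have hs' : pvShape n v' := pvShape_set2 n hn v hs _ _ 1 hb1 hb2 hb3
      have hb' : pvBin v' := pvBin_set2 v hb _ _ hb1 hb3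
      have hget' : ∀ a b : Int, 0 ≤ a → a ≤ n + 1 → 0 ≤ b → b ≤ n + 1 →
          pvGet2 v' a b = if a = cx + d.1 ∧ b = cy + d.2 then 1 else pvGet2 v a b :=
        fun a b h1' h2' h3' h4' =>
          pvGet2_set2 n hn v hs _ _ a b 1 hb1 hb2 hb3 hb4 h1' h2' h3' h4'
      obtain ⟨new', hq', hsr, hbr, hmark, hnewok, htgt, hμ⟩ :=
        ih hds' v' (q ++ [c']) hs' hb'
      refine ⟨c' :: new', ?_, ?_, ?_, ?_, ?_, ?_, ?_⟩
      · simp only [List.foldl_cons, hstep, hq', List.append_assoc, List.singleton_append]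
      · simpa only [List.foldl_cons, hstep] using hsr
      · simpa only [List.foldl_cons, hstep] using hbr
      · intro a hga
        obtain ⟨g1, g2, g3, g4⟩ := hga
        simp only [List.foldl_cons, hstep]
        rw [hmark a ⟨g1, g2, g3, g4⟩]
        have := hget' a.1 a.2 (by omega) (by omega) (by omega) (by omega)
        unfold pvMarked
        rw [this]
        simp only [List.mem_cons]
        constructor
        · rintro (h | h)
          · split_ifs at h with hh
            · exact Or.inr (Or.inl (by rw [hc']; exact Prod.ext_iff.2 ⟨hh.1, hh.2⟩))
            · exact Or.inl h
          · exact Or.inr (Or.inr h)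
        · rintro (h | h | h)
          · left
            split_ifs with hh
            · rfl
            · exact h
          · left
            rw [h, hc']
            simp
          · right; exact h
      · intro a ha
        rcases List.mem_cons.mp ha with ha | ha
        · subst ha
          refine ⟨⟨⟨h1, h2, h3, h4⟩, h6⟩, ?_⟩
          rw [pvMem_nbrs]
          exact ⟨d, hdstep, rfl⟩
        · exact hnewok a ha
      · intro e he hoke
        rcases List.mem_cons.mp he with he | he
        · subst he
          simp only [List.foldl_cons, hstep]
          have hgE : pvInGrid n (cx + e.1, cy + e.2) := hoke.1
          rw [hmark _ hgE]
          left
          unfold pvMarked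
          rw [hget' _ _ (by omega) (by omega) (by omega) (by omega)]
          simp
        · simpa only [List.foldl_cons, hstep] using htgt e he hoke
      · simp only [List.foldl_cons, hstep]
        have hz := pvZeros_set2 n hn v hs _ _ hb1 hb2 hb3 hb4 h5
        rw [← hv'] at hz
        have : (q ++ [c']).length = q.length + 1 := by simp
        omega
    · have hstep : pvStepA miro n cx cy (v, q) d = (v, q) := by
        unfold pvStepA
        rw [if_neg hg]
      obtain ⟨new, hq', hsr, hbr, hmark, hnewok, htgt, hμ⟩ := ih hds' v q hs hb
      refine ⟨new, ?_, ?_, ?_, ?_, hnewok, ?_, ?_⟩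
      · simpa only [List.foldl_cons, hstep] using hq'
      · simpa only [List.foldl_cons, hstep] using hsr
      · simpa only [List.foldl_cons, hstep] using hbr
      · intro a hga
        simpa only [List.foldl_cons, hstep] using hmark a hga
      · intro e he hoke
        rcases List.mem_cons.mp he with he | he
        · subst he
          simp only [List.foldl_cons, hstep]
          obtain ⟨⟨g1, g2, g3, g4⟩, g5⟩ := hoke
          simp only [hc'] at g1 g2 g3 g4 g5
          have h5 : pvGet2 v (cx + e.1) (cy + e.2) ≠ 0 := by
            intro h0
            exact hg ⟨g1, g2, g3, g4, h0, g5⟩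
          have h1 : pvGet2 v (cx + e.1) (cy + e.2) = 1 := by
            rcases pvBin_get v hb (cx + e.1) (cy + e.2) with h | h
            · exact absurd h h5
            · exact h
          have : pvMarked v (cx + e.1, cy + e.2) := h1
          rw [hmark _ ⟨g1, g2, g3, g4⟩]
          exact Or.inl this
        · simpa only [List.foldl_cons, hstep] using htgt e he hoke
      · simpa only [List.foldl_cons, hstep] using hμ

theorem pvLoopA_nil (miro : List (List Int)) (n : Int) (fuel : Nat) (v : List (List Int)) :
    pvLoopA miro n fuel v [] = false := by
  cases fuel <;> rfl

theorem pvLoopA_char (miro : List (List Int)) (n : Int) (hn : 1 ≤ n) :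
    ∀ fuel (v : List (List Int)) (q : List (Int × Int)), pvInvA miro n v q →
      2 * pvZeros v + q.length ≤ fuel →
      (pvLoopA miro n fuel v q = true ↔ pvReach miro n q (n, n)) := by
  intro fuel
  induction fuel with
  | zero =>
    intro v q hInv hμ
    have hq : q = [] := List.length_eq_zero_iff.mp (by omega)
    subst hq
    rw [pvLoopA_nil]
    simp only [Bool.false_eq_true, false_iff]
    exact pvReach_nil miro n _
  | succ fuel ih =>
    intro v q hInv hμ
    rcases q with _ | ⟨⟨cx, cy⟩, rest⟩
    · rw [pvLoopA_nil]
      simp only [Bool.false_eq_true, false_iff]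
      exact pvReach_nil miro n _
    obtain ⟨hs, hb, hproc, hqm, htgtI⟩ := hInv
    by_cases htgt : cx = n ∧ cy = n
    · have hL : pvLoopA miro n (fuel + 1) v ((cx, cy) :: rest) = true := by
        simp only [pvLoopA]
        rw [if_pos htgt]
      rw [hL]
      simp only [true_iff]
      refine pvReach.base _ ?_
      have : ((n, n) : Int × Int) = (cx, cy) := Prod.ext_iff.2 ⟨htgt.1.symm, htgt.2.symm⟩
      rw [this]
      exact List.mem_cons_self
    · have hunf : pvLoopA miro n (fuel + 1) v ((cx, cy) :: rest)
          = pvLoopA miro n fuel (pvSteps.foldl (pvStepA miro n cx cy) (v, rest)).1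
              (pvSteps.foldl (pvStepA miro n cx cy) (v, rest)).2 := by
        simp only [pvLoopA]
        rw [if_neg htgt, pvFoldA_eq]
      obtain ⟨new, hq', hs', hb', hmark, hnewok, hstep5, hμ'⟩ :=
        pvStepFold_spec miro n hn cx cy pvSteps (fun d hd => hd) v rest hs hb
      set r := pvSteps.foldl (pvStepA miro n cx cy) (v, rest) with hr
      have hgr : pvInGrid n ((n, n) : Int × Int) := ⟨by omega, by omega, by omega, by omega⟩
      have hnewsub : ∀ a ∈ new, a ∈ r.2 := by
        rw [hq']; intro a ha; exact List.mem_append_right _ ha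
      have hrest : ∀ a ∈ rest, a ∈ r.2 := by
        rw [hq']; intro a ha; exact List.mem_append_left _ ha
      have hnbr_marked : ∀ e ∈ pvNbrs (cx, cy), pvOk miro n e → pvMarked r.1 e := by
        intro e he hok
        rw [pvMem_nbrs] at he
        obtain ⟨sδ, hsmem, rfl⟩ := he
        exact hstep5 sδ hsmem hok
      have hproc' : ∀ c, pvInGrid n c → pvMarked r.1 c → c ∉ r.2 →
          ∀ d ∈ pvNbrs c, pvOk miro n d → pvMarked r.1 d := by
        intro c hgc hmc hcq d hd hokd
        rcases (hmark c hgc).1 hmc with hmv | hnew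
        · by_cases hcc : c = (cx, cy)
          · subst hcc; exact hnbr_marked d hd hokd
          · have hcnotq : c ∉ (cx, cy) :: rest := by
              intro hmem
              rcases List.mem_cons.mp hmem with h | h
              · exact hcc h
              · exact hcq (hrest _ h)
            exact (hmark d hokd.1).2 (Or.inl (hproc c hgc hmv hcnotq d hd hokd))
        · exact absurd (hnewsub _ hnew) hcq
      have htgt' : pvMarked r.1 (n, n) → (n, n) ∈ r.2 := by
        intro hmt
        rcases (hmark _ hgr).1 hmt with h | h
        · rcases List.mem_cons.mp (htgtI h) with h' | h'
          · exact absurd ⟨(Prod.ext_iff.mp h').1.symm, (Prod.ext_iff.mp h').2.symm⟩ htgt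
          · exact hrest _ h'
        · exact hnewsub _ h
      have hInv' : pvInvA miro n r.1 r.2 := by
        refine ⟨hs', hb', hproc', ?_, htgt'⟩
        intro c hc hgc
        rw [hq'] at hc
        rcases List.mem_append.mp hc with h | h
        · exact (hmark c hgc).2 (Or.inl (hqm c (List.mem_cons_of_mem _ h) hgc))
        · exact (hmark c hgc).2 (Or.inr h)
      have hμnew : 2 * pvZeros r.1 + r.2.length ≤ fuel := by
        have hlen : (((cx, cy) : Int × Int) :: rest).length = rest.length + 1 := rfl
        omega
      rw [hunf, ih r.1 r.2 hInv' hμnew]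
      constructor
      · intro h
        refine pvReach_mono miro n r.2 _ ?_ _ h
        intro e he
        rw [hq'] at he
        rcases List.mem_append.mp he with h' | h'
        · exact pvReach.base _ (List.mem_cons_of_mem _ h')
        · obtain ⟨hoke, hnbre⟩ := hnewok e h'
          exact pvReach.step _ _ (pvReach.base _ List.mem_cons_self) hnbre hoke
      · intro h
        have L : ∀ t, pvReach miro n ((cx, cy) :: rest) t →
            t = (cx, cy) ∨ pvReach miro n r.2 t ∨
              (pvInGrid n t ∧ pvMarked r.1 t ∧ t ∉ r.2) := by
          intro t ht
          induction ht with
          | base c hc =>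
            rcases List.mem_cons.mp hc with h' | h'
            · exact Or.inl h'
            · exact Or.inr (Or.inl (pvReach.base _ (hrest _ h')))
          | step c d hc hd hok ihL =>
            rcases ihL with h' | h' | ⟨hg', hm', hq''⟩
            · subst h'
              by_cases hdq : d ∈ r.2
              · exact Or.inr (Or.inl (pvReach.base _ hdq))
              · exact Or.inr (Or.inr ⟨hok.1, hnbr_marked d hd hok, hdq⟩)
            · exact Or.inr (Or.inl (pvReach.step _ _ h' hd hok))
            · have hmd : pvMarked r.1 d := hproc' c hg' hm' hq'' d hd hok
              by_cases hdq : d ∈ r.2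
              · exact Or.inr (Or.inl (pvReach.base _ hdq))
              · exact Or.inr (Or.inr ⟨hok.1, hmd, hdq⟩)
        rcases L _ h with h' | h' | ⟨hg', hm', hq''⟩
        · exact absurd ⟨(Prod.ext_iff.mp h').1.symm, (Prod.ext_iff.mp h').2.symm⟩ htgt
        · exact h'
        · exact absurd (htgt' hm') hq''

-- ---------- B-side lemmas ----------

theorem pvCellAB : pvCellA = pvCellB := by
  funext miro i j
  unfold pvCellA pvCellB
  cases PySem.List.pyGet? miro i <;> rfl

def pvCond (miro : List (List Int)) (S : List (Int × Int)) (c : Int × Int) : Prop :=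
  c ∉ S ∧ pvCellB miro c.1 c.2 ≠ 5 ∧ ∃ d ∈ pvSteps, (c.1 + d.1, c.2 + d.2) ∈ S

theorem pvCondB_iff (miro : List (List Int)) (S : List (Int × Int)) (c : Int × Int) :
    (!(S.contains c) &&
      pvSteps.any (fun d => S.contains (c.1 + d.1, c.2 + d.2)) &&
      (pvCellB miro c.1 c.2 != 5)) = true
    ↔ pvCond miro S c := by
  simp [pvCond, List.any_eq_true, and_assoc]
  tauto

theorem pvSweepCell_pos (miro : List (List Int)) (n : Int)
    (st : List (Int × Int) × Bool) (c : Int × Int) (h : pvCond miro st.1 c) :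
    pvSweepCell miro n st c = (PySem.Set.add st.1 c, true) := by
  unfold pvSweepCell
  rw [if_pos ((pvCondB_iff miro st.1 c).2 h)]

theorem pvSweepCell_neg (miro : List (List Int)) (n : Int)
    (st : List (Int × Int) × Bool) (c : Int × Int) (h : ¬ pvCond miro st.1 c) :
    pvSweepCell miro n st c = st := by
  unfold pvSweepCell
  rw [if_neg (fun hh => h ((pvCondB_iff miro st.1 c).1 hh))]

def pvCells (n : Int) : List (Int × Int) :=
  (PySem.List.pyRange 1 (n + 1) 1).flatMap
    (fun i => (PySem.List.pyRange 1 (n + 1) 1).map (fun j => (i, j)))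

theorem pvMem_cells (n : Int) (c : Int × Int) : c ∈ pvCells n ↔ pvInGrid n c := by
  simp [pvCells, List.mem_flatMap, PySem.List.mem_pyRange_one, pvInGrid]
  constructor
  · rintro ⟨i, ⟨h1, h2⟩, j, ⟨h3, h4⟩, rfl⟩
    exact ⟨h1, by omega, h3, by omega⟩
  · rintro ⟨h1, h2, h3, h4⟩
    exact ⟨c.1, ⟨h1, by omega⟩, c.2, ⟨h3, by omega⟩, rfl⟩

theorem pvSweep_eq_flat (miro : List (List Int)) (n : Int) (S : List (Int × Int)) :
    pvSweep miro n S = (pvCells n).foldl (pvSweepCell miro n) (S, false) := by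
  unfold pvSweep pvCells
  rw [List.foldl_flatMap]
  congr 1
  funext st i
  rw [List.foldl_map]

theorem pvSweepFold_prefix (miro : List (List Int)) (n : Int) :
    ∀ (L : List (Int × Int)) (S : List (Int × Int)) (fl : Bool),
      ∃ new, (L.foldl (pvSweepCell miro n) (S, fl)).1 = S ++ new ∧ ∀ a ∈ new, a ∈ L := by
  intro L
  induction L with
  | nil => intro S fl; exact ⟨[], by simp, by simp⟩
  | cons c L ih =>
    intro S fl
    rw [List.foldl_cons]
    by_cases hc : pvCond miro S c
    · rw [pvSweepCell_pos miro n _ c hc]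
      rw [PySem.Set.add_of_not_mem hc.1]
      obtain ⟨new, h1, h2⟩ := ih (S ++ [c]) true
      refine ⟨c :: new, ?_, ?_⟩
      · rw [h1]; simp
      · intro a ha
        rcases List.mem_cons.mp ha with h | h
        · simp [h]
        · exact List.mem_cons_of_mem _ (h2 a h)
    · rw [pvSweepCell_neg miro n _ c hc]
      obtain ⟨new, h1, h2⟩ := ih S fl
      exact ⟨new, h1, fun a ha => List.mem_cons_of_mem _ (h2 a ha)⟩

theorem pvFlag_persists (miro : List (List Int)) (n : Int) :
    ∀ (L : List (Int × Int)) (S : List (Int × Int)),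
      (L.foldl (pvSweepCell miro n) (S, true)).2 = true := by
  intro L
  induction L with
  | nil => intro S; rfl
  | cons c L ih =>
    intro S
    rw [List.foldl_cons]
    by_cases hc : pvCond miro S c
    · rw [pvSweepCell_pos miro n _ c hc]; exact ih _
    · rw [pvSweepCell_neg miro n _ c hc]; exact ih S

theorem pvSweepFold_nochange (miro : List (List Int)) (n : Int) :
    ∀ (L : List (Int × Int)) (S : List (Int × Int)),
      (L.foldl (pvSweepCell miro n) (S, false)).2 = false →
      (L.foldl (pvSweepCell miro n) (S, false)).1 = S ∧ ∀ c ∈ L, ¬ pvCond miro S c := by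
  intro L
  induction L with
  | nil => intro S _; exact ⟨rfl, by simp⟩
  | cons c L ih =>
    intro S hfl
    rw [List.foldl_cons] at hfl ⊢
    by_cases hc : pvCond miro S c
    · rw [pvSweepCell_pos miro n _ c hc] at hfl
      rw [pvFlag_persists miro n L _] at hfl
      exact absurd hfl (by simp)
    · rw [pvSweepCell_neg miro n _ c hc] at hfl ⊢
      obtain ⟨h1, h2⟩ := ih S hfl
      refine ⟨h1, ?_⟩
      intro e he
      rcases List.mem_cons.mp he with h | h
      · rw [h]; exact hc
      · exact h2 e h

theorem pvSweepFold_growth (miro : List (List Int)) (n : Int) :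
    ∀ (L : List (Int × Int)) (S : List (Int × Int)),
      (L.foldl (pvSweepCell miro n) (S, false)).2 = true →
      S.length < (L.foldl (pvSweepCell miro n) (S, false)).1.length := by
  intro L
  induction L with
  | nil => intro S h; simp at h
  | cons c L ih =>
    intro S hfl
    rw [List.foldl_cons] at hfl ⊢
    by_cases hc : pvCond miro S c
    · rw [pvSweepCell_pos miro n _ c hc] at hfl ⊢
      rw [PySem.Set.add_of_not_mem hc.1] at hfl ⊢
      obtain ⟨new, h1, _⟩ := pvSweepFold_prefix miro n L (S ++ [c]) true
      rw [h1]
      simp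
    · rw [pvSweepCell_neg miro n _ c hc] at hfl ⊢
      exact ih S hfl

theorem pvSweepFold_nodup (miro : List (List Int)) (n : Int) :
    ∀ (L : List (Int × Int)) (S : List (Int × Int)) (fl : Bool), S.Nodup →
      (L.foldl (pvSweepCell miro n) (S, fl)).1.Nodup := by
  intro L
  induction L with
  | nil => intro S fl h; exact h
  | cons c L ih =>
    intro S fl h
    rw [List.foldl_cons]
    by_cases hc : pvCond miro S c
    · rw [pvSweepCell_pos miro n _ c hc]
      exact ih _ _ (PySem.Set.nodup_add _ _ h)
    · rw [pvSweepCell_neg miro n _ c hc]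
      exact ih S fl h

theorem pvSweepFold_sound (miro : List (List Int)) (n : Int)
    (P : Int × Int → Prop)
    (hcl : ∀ c d, P c → d ∈ pvNbrs c → pvOk miro n d → P d) :
    ∀ (L : List (Int × Int)), (∀ c ∈ L, pvInGrid n c) →
    ∀ (S : List (Int × Int)) (fl : Bool), (∀ a ∈ S, P a) →
      ∀ a ∈ (L.foldl (pvSweepCell miro n) (S, fl)).1, P a := by
  intro L
  induction L with
  | nil => intro _ S fl hS a ha; exact hS a ha
  | cons c L ih =>
    intro hLg S fl hS
    rw [List.foldl_cons]
    by_cases hc : pvCond miro S c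
    · rw [pvSweepCell_pos miro n _ c hc]
      refine ih (fun e he => hLg e (List.mem_cons_of_mem _ he)) _ true ?_
      intro a ha
      rw [PySem.Set.add_of_not_mem hc.1] at ha
      rcases List.mem_append.mp ha with h | h
      · exact hS a h
      · rw [List.mem_singleton.mp h]
        obtain ⟨_, hcell, d, hd, hmem⟩ := hc
        refine hcl (c.1 + d.1, c.2 + d.2) c (hS _ hmem) ?_ ?_
        · apply pvNbrs_symm
          rw [pvMem_nbrs]
          exact ⟨d, hd, rfl⟩
        · exact ⟨hLg c List.mem_cons_self, by rw [pvCellAB]; exact hcell⟩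
    · rw [pvSweepCell_neg miro n _ c hc]
      exact ih (fun e he => hLg e (List.mem_cons_of_mem _ he)) S fl hS

theorem pvLen_le_grid (n : Int) (S : List (Int × Int)) (hnd : S.Nodup)
    (hg : ∀ a ∈ S, pvInGrid n a) : S.length ≤ n.toNat * n.toNat := by
  classical
  have h1 : S.length = S.toFinset.card := (List.toFinset_card_of_nodup hnd).symm
  have h2 : S.toFinset ⊆ (Finset.Icc (1 : Int) n) ×ˢ (Finset.Icc (1 : Int) n) := by
    intro a ha
    rw [List.mem_toFinset] at ha
    obtain ⟨g1, g2, g3, g4⟩ := hg a ha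
    rw [Finset.mem_product, Finset.mem_Icc, Finset.mem_Icc]
    exact ⟨⟨g1, g2⟩, ⟨g3, g4⟩⟩
  have h3 := Finset.card_le_card h2
  rw [Finset.card_product, Int.card_Icc] at h3
  have h4 : (n + 1 - 1 : Int) = n := by ring
  rw [h4] at h3
  omega

theorem pvLoopB_subset (miro : List (List Int)) (n : Int) :
    ∀ (fuel : Nat) (S : List (Int × Int)) (a : Int × Int), a ∈ S → a ∈ pvLoopB miro n fuel S := by
  intro fuel
  induction fuel with
  | zero => intro S a ha; exact ha
  | succ fuel ih =>
    intro S a ha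
    simp only [pvLoopB]
    obtain ⟨new, h1, _⟩ := pvSweepFold_prefix miro n (pvCells n) S false
    rw [← pvSweep_eq_flat] at h1
    by_cases h2 : (pvSweep miro n S).2
    · rw [if_pos h2]
      exact ih _ _ (by rw [h1]; exact List.mem_append_left _ ha)
    · rw [if_neg h2]
      rw [h1]
      exact List.mem_append_left _ ha

theorem pvLoopB_mem_props (miro : List (List Int)) (n : Int)
    (P : Int × Int → Prop)
    (hcl : ∀ c d, P c → d ∈ pvNbrs c → pvOk miro n d → P d) :
    ∀ (fuel : Nat) (S : List (Int × Int)), (∀ a ∈ S, P a) →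
      ∀ a ∈ pvLoopB miro n fuel S, P a := by
  intro fuel
  induction fuel with
  | zero => intro S hS a ha; exact hS a ha
  | succ fuel ih =>
    intro S hS
    simp only [pvLoopB]
    have hsw : ∀ a ∈ (pvSweep miro n S).1, P a := by
      rw [pvSweep_eq_flat]
      exact pvSweepFold_sound miro n P hcl (pvCells n)
        (fun c hc => (pvMem_cells n c).1 hc) S false hS
    by_cases h2 : (pvSweep miro n S).2
    · rw [if_pos h2]
      exact ih _ hsw
    · rw [if_neg h2]
      exact hsw

theorem pvLoopB_closed (miro : List (List Int)) (n : Int) (hn : 1 ≤ n) :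
    ∀ (fuel : Nat) (S : List (Int × Int)), S.Nodup → (∀ a ∈ S, pvInGrid n a) →
      n.toNat * n.toNat < S.length + fuel →
      ∀ c : Int × Int, pvInGrid n c → pvCellA miro c.1 c.2 ≠ 5 →
        (∃ d ∈ pvSteps, (c.1 + d.1, c.2 + d.2) ∈ pvLoopB miro n fuel S) →
        c ∈ pvLoopB miro n fuel S := by
  intro fuel
  induction fuel with
  | zero =>
    intro S hnd hg hlen
    exact absurd (pvLen_le_grid n S hnd hg) (by omega)
  | succ fuel ih =>
    intro S hnd hg hlen c hgc hcell hnbr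
    simp only [pvLoopB] at hnbr ⊢
    by_cases h2 : (pvSweep miro n S).2
    · rw [if_pos h2] at hnbr ⊢
      refine ih (pvSweep miro n S).1 ?_ ?_ ?_ c hgc hcell hnbr
      · rw [pvSweep_eq_flat]
        exact pvSweepFold_nodup miro n (pvCells n) S false hnd
      · intro a ha
        rw [pvSweep_eq_flat] at ha
        obtain ⟨new, h1, hmem⟩ := pvSweepFold_prefix miro n (pvCells n) S false
        rw [h1] at ha
        rcases List.mem_append.mp ha with h | h
        · exact hg a h
        · exact (pvMem_cells n a).1 (hmem a h)
      · have hgrow : S.length < (pvSweep miro n S).1.length := by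
          rw [pvSweep_eq_flat] at h2 ⊢
          exact pvSweepFold_growth miro n (pvCells n) S h2
        omega
    · rw [if_neg h2] at hnbr ⊢
      have h2f : ((pvCells n).foldl (pvSweepCell miro n) (S, false)).2 = false := by
        rw [← pvSweep_eq_flat]
        revert h2
        cases (pvSweep miro n S).2 <;> simp
      have hnc := pvSweepFold_nochange miro n (pvCells n) S h2f
      obtain ⟨h1, h2'⟩ := hnc
      rw [← pvSweep_eq_flat] at h1
      rw [h1] at hnbr ⊢
      have hcellmem : c ∈ pvCells n := (pvMem_cells n c).2 hgc
      have := h2' c hcellmem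
      unfold pvCond at this
      push_neg at this
      by_contra hcS
      obtain ⟨d, hd, hmem⟩ := hnbr
      exact absurd hmem (this hcS (by rw [← pvCellAB]; exact hcell) d hd)

theorem pvSeedFold_mem (miro : List (List Int)) (n x y : Int) :
    ∀ (ss : List (Int × Int)) (S : List (Int × Int)) (d : Int × Int),
      (d ∈ ss.foldl
        (fun (S : List (Int × Int)) s =>
          if pvOkB miro n (x + s.1) (y + s.2) then PySem.Set.add S (x + s.1, y + s.2) else S) S
      ↔ d ∈ S ∨ ∃ s, s ∈ ss ∧ d = (x + s.1, y + s.2) ∧ pvOkB miro n (x + s.1) (y + s.2) = true) := by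
  intro ss
  induction ss with
  | nil =>
    intro S d
    simp
  | cons s ss ih =>
    intro S d
    rw [List.foldl_cons]
    by_cases h : pvOkB miro n (x + s.1) (y + s.2) = true
    · rw [if_pos h, ih]
      constructor
      · rintro (hm | hm)
        · rcases (PySem.Set.mem_add _ _ _).1 hm with hm' | hm'
          · exact Or.inl hm'
          · exact Or.inr ⟨s, List.mem_cons_self, hm', h⟩
        · obtain ⟨t, ht, h1, h2⟩ := hm
          exact Or.inr ⟨t, List.mem_cons_of_mem _ ht, h1, h2⟩
      · rintro (hm | hm)
        · exact Or.inl ((PySem.Set.mem_add _ _ _).2 (Or.inl hm))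
        · obtain ⟨t, ht, h1, h2⟩ := hm
          rcases List.mem_cons.mp ht with ht' | ht'
          · subst ht'
            exact Or.inl ((PySem.Set.mem_add _ _ _).2 (Or.inr h1))
          · exact Or.inr ⟨t, ht', h1, h2⟩
    · rw [if_neg h, ih]
      constructor
      · rintro (hm | hm)
        · exact Or.inl hm
        · obtain ⟨t, ht, h1, h2⟩ := hm
          exact Or.inr ⟨t, List.mem_cons_of_mem _ ht, h1, h2⟩
      · rintro (hm | hm)
        · exact Or.inl hm
        · obtain ⟨t, ht, h1, h2⟩ := hm
          rcases List.mem_cons.mp ht with ht' | ht'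
          · subst ht'
            exact absurd h2 h
          · exact Or.inr ⟨t, ht', h1, h2⟩

theorem pvOkB_iff (miro : List (List Int)) (n i j : Int) :
    pvOkB miro n i j = true ↔
      (1 ≤ i ∧ i ≤ n ∧ 1 ≤ j ∧ j ≤ n ∧ pvCellB miro i j ≠ 5) := by
  simp [pvOkB, and_assoc]

theorem pvSeed_mem (miro : List (List Int)) (n x y : Int) (d : Int × Int) :
    d ∈ pvSteps.foldl
        (fun (S : List (Int × Int)) s =>
          if pvOkB miro n (x + s.1) (y + s.2) then PySem.Set.add S (x + s.1, y + s.2) else S)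
        []
    ↔ (d ∈ pvNbrs (x, y) ∧ pvOk miro n d) := by
  rw [pvSeedFold_mem]
  simp only [List.not_mem_nil, false_or]
  constructor
  · rintro ⟨s, hs, rfl, hok⟩
    obtain ⟨h1, h2, h3, h4, h5⟩ := (pvOkB_iff miro n _ _).1 hok
    refine ⟨?_, ⟨⟨h1, h2, h3, h4⟩, by rw [pvCellAB]; exact h5⟩⟩
    rw [pvMem_nbrs]
    exact ⟨s, hs, rfl⟩
  · rintro ⟨hnb, ⟨⟨h1, h2, h3, h4⟩, h5⟩⟩
    rw [pvMem_nbrs] at hnb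
    obtain ⟨s, hs, rfl⟩ := hnb
    exact ⟨s, hs, rfl, (pvOkB_iff miro n _ _).2 ⟨h1, h2, h3, h4, by rw [← pvCellAB]; exact h5⟩⟩

theorem pvSeed_nodup (miro : List (List Int)) (n x y : Int) :
    ∀ (ss : List (Int × Int)) (S : List (Int × Int)), S.Nodup →
      (ss.foldl
        (fun (S : List (Int × Int)) s =>
          if pvOkB miro n (x + s.1) (y + s.2) then PySem.Set.add S (x + s.1, y + s.2) else S)
        S).Nodup := by
  intro ss
  induction ss with
  | nil => intro S h; exact h
  | cons s ss ih =>
    intro S h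
    rw [List.foldl_cons]
    by_cases hc : pvOkB miro n (x + s.1) (y + s.2) = true
    · rw [if_pos hc]; exact ih _ (PySem.Set.nodup_add _ _ h)
    · rw [if_neg hc]; exact ih S h

theorem pvLoopB_char (miro : List (List Int)) (n : Int) (hn : 1 ≤ n)
    (seed : List (Int × Int)) (hnd : seed.Nodup)
    (hg : ∀ a ∈ seed, pvOk miro n a) (d : Int × Int) :
    (d ∈ pvLoopB miro n (n * n + 1).toNat seed ↔ pvReach miro n seed d) := by
  have hfuel : (n * n + 1).toNat = n.toNat * n.toNat + 1 := by
    have h1 : (n * n + 1 : Int) = ((n.toNat * n.toNat + 1 : Nat) : Int) := by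
      push_cast
      rw [Int.toNat_of_nonneg (by omega)]
    rw [h1, Int.toNat_natCast]
  constructor
  · intro h
    exact pvLoopB_mem_props miro n (pvReach miro n seed)
      (fun c e hc he hok => pvReach.step c e hc he hok)
      _ seed (fun a ha => pvReach.base a ha) d h
  · intro h
    induction h with
    | base c hc => exact pvLoopB_subset miro n _ seed c hc
    | step c e hc he hok ihr =>
      refine pvLoopB_closed miro n hn _ seed hnd (fun a ha => (hg a ha).1)
        (by omega) e hok.1 hok.2 ?_
      have hce : c ∈ pvNbrs e := pvNbrs_symm c e he
      rw [pvMem_nbrs] at hce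
      obtain ⟨s, hs, rfl⟩ := hce
      exact ⟨s, hs, ihr⟩

-- ---------- top-level assembly ----------

-- ---------- top-level assembly ----------

theorem pvBridge (miro : List (List Int)) (n x y : Int) (seed : List (Int × Int))
    (hseed : ∀ d, d ∈ seed ↔ (d ∈ pvNbrs (x, y) ∧ pvOk miro n d)) (t : Int × Int) :
    pvReach miro n [(x, y)] t ↔ (t = (x, y) ∨ pvReach miro n seed t) := by
  constructor
  · intro h
    induction h with
    | base c hc => simp at hc; exact Or.inl hc
    | step c d hc hd hok ih =>
      rcases ih with rfl | hr
      · exact Or.inr (pvReach.base d ((hseed d).2 ⟨hd, hok⟩))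
      · exact Or.inr (pvReach.step c d hr hd hok)
  · rintro (rfl | h)
    · exact pvReach.base _ (by simp)
    · refine pvReach_mono miro n seed _ ?_ t h
      intro e he
      rcases (hseed e).1 he with ⟨hn', hok⟩
      exact pvReach.step (x, y) e (pvReach.base _ (by simp)) hn' hok

theorem pvBool_eq_of_iff (a b : Bool) (h : a = true ↔ b = true) : a = b := by
  cases a <;> cases b <;> simp_all

theorem pvStepFold_noop (miro : List (List Int)) (n x y : Int)
    (hdeg : pvDegen x y n) :
    ∀ (ds : List (Int × Int)), (∀ d ∈ ds, d ∈ pvSteps) →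
    ∀ (v : List (List Int)) (q : List (Int × Int)),
      ds.foldl (pvStepA miro n x y) (v, q) = (v, q) := by
  intro ds
  induction ds with
  | nil => intro _ v q; rfl
  | cons d ds ih =>
    intro hds v q
    rw [List.foldl_cons]
    have hstep : pvStepA miro n x y (v, q) d = (v, q) := by
      unfold pvStepA
      rw [if_neg]
      rintro ⟨g1, g2, g3, g4, -, -⟩
      have hd := hds d List.mem_cons_self
      simp [pvSteps] at hd
      rcases hd with h | h | h | h <;> rw [h] at g1 g2 g3 g4 <;> simp at g1 g2 g3 g4 <;>
        rcases hdeg with hh | hh | hh | ⟨hh1 | hh1, hh2 | hh2⟩ <;> omega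
    rw [hstep]
    exact ih (fun e he => hds e (List.mem_cons_of_mem _ he)) v q

theorem pvSweep_nil (miro : List (List Int)) (n : Int) :
    pvSweep miro n [] = ([], false) := by
  rw [pvSweep_eq_flat]
  have : ∀ (L : List (Int × Int)),
      L.foldl (pvSweepCell miro n) (([] : List (Int × Int)), false) = ([], false) := by
    intro L
    induction L with
    | nil => rfl
    | cons c L ih =>
      rw [List.foldl_cons, pvSweepCell_neg]
      · exact ih
      · rintro ⟨-, -, d, -, hm⟩
        simp at hm
  exact this _

theorem pvLoopB_nil (miro : List (List Int)) (n : Int) :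
    ∀ (fuel : Nat), pvLoopB miro n fuel [] = [] := by
  intro fuel
  induction fuel with
  | zero => rfl
  | succ fuel ih =>
    simp only [pvLoopB, pvSweep_nil]
    simp

-- both ports return false on a degenerate start (no grid cell is ever inspected)
theorem pvDegen_case (miro : List (List Int)) (n x y : Int) (hnm : -1 ≤ n)
    (hdeg : pvDegen x y n) (htgt : ¬ (x = n ∧ y = n)) :
    bfs x y miro n = false ∧ bfs_alt x y miro n = false := by
  constructor
  · show pvLoopA miro n (2 * (n + 2) * (n + 2) + 1).toNat
      (pvSet2 (List.replicate (n + 2).toNat (List.replicate (n + 2).toNat 0)) x y 1)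
      [(x, y)] = false
    have hpos : 0 ≤ 2 * (n + 2) * (n + 2) := by nlinarith [mul_self_nonneg (n + 2)]
    have hf : (2 * (n + 2) * (n + 2) + 1).toNat = (2 * (n + 2) * (n + 2)).toNat + 1 := by
      omega
    rw [hf]
    simp only [pvLoopA]
    rw [if_neg htgt, pvFoldA_eq,
      pvStepFold_noop miro n x y hdeg pvSteps (fun d hd => hd)]
    exact pvLoopA_nil miro n _ _
  · show (if x = n ∧ y = n then true else _) = false
    rw [if_neg htgt]
    have hseednil : pvSteps.foldl
        (fun (S : List (Int × Int)) d =>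
          if pvOkB miro n (x + d.1) (y + d.2) then PySem.Set.add S (x + d.1, y + d.2) else S)
        [] = [] := by
      rw [List.eq_nil_iff_forall_not_mem]
      intro d hd
      obtain ⟨hnb, ⟨⟨g1, g2, g3, g4⟩, -⟩⟩ := (pvSeed_mem miro n x y d).1 hd
      rw [pvMem_nbrs] at hnb
      obtain ⟨t, ht, rfl⟩ := hnb
      simp [pvSteps] at ht
      rcases ht with h | h | h | h <;> rw [h] at g1 g2 g3 g4 <;> simp at g1 g2 g3 g4 <;>
        rcases hdeg with hh | hh | hh | ⟨hh1 | hh1, hh2 | hh2⟩ <;> omega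
    simp only [hseednil, pvLoopB_nil]
    simp

-- ===== VERDICT (by name: the statement is the Claim_ definition above) =====
theorem bfs_spec : Claim_equal_bfs := by
  intro x y miro n _ hpre
  obtain ⟨hnm, hxlo, hxhi, hylo, hyhi, -⟩ := hpre
  unfold Spec_bfs
  by_cases htgt0 : x = n ∧ y = n
  · have hpos : 0 ≤ 2 * (n + 2) * (n + 2) := by nlinarith [mul_self_nonneg (n + 2)]
    have hf : (2 * (n + 2) * (n + 2) + 1).toNat = (2 * (n + 2) * (n + 2)).toNat + 1 := by
      omega
    have hAt : bfs x y miro n = true := by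
      show pvLoopA miro n (2 * (n + 2) * (n + 2) + 1).toNat
        (pvSet2 (List.replicate (n + 2).toNat (List.replicate (n + 2).toNat 0)) x y 1)
        [(x, y)] = true
      rw [hf]
      simp only [pvLoopA]
      rw [if_pos htgt0]
    have hBt : bfs_alt x y miro n = true := by
      show (if x = n ∧ y = n then true else _) = true
      rw [if_pos htgt0]
    rw [hAt, hBt]
  · by_cases hdeg : pvDegen x y n
    · obtain ⟨hA, hB⟩ := pvDegen_case miro n x y hnm hdeg htgt0
      rw [hA, hB]
    · unfold pvDegen at hdeg
      push_neg at hdeg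
      obtain ⟨hx0', hy0', hn', -⟩ := hdeg
      have hx0 : 0 ≤ x := hx0'
      have hy0 : 0 ≤ y := hy0'
      have hn : 1 ≤ n := hn'
      -- initial state of port A
      have hsrep : pvShape n (List.replicate (n + 2).toNat (List.replicate (n + 2).toNat (0 : Int))) := by
        constructor
        · simp
        · intro r hr
          rw [List.eq_of_mem_replicate hr]
          simp
      have hbrep : pvBin (List.replicate (n + 2).toNat (List.replicate (n + 2).toNat (0 : Int))) := by
        intro r hr z hz
        rw [List.eq_of_mem_replicate hr] at hz
        exact Or.inl (List.eq_of_mem_replicate hz)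
      set v0 := pvSet2 (List.replicate (n + 2).toNat (List.replicate (n + 2).toNat (0 : Int))) x y 1
        with hv0
      have hs0 : pvShape n v0 := pvShape_set2 n hn _ hsrep x y 1 hx0 hxhi hy0
      have hb0 : pvBin v0 := pvBin_set2 _ hbrep x y hx0 hy0
      have hget0 : ∀ a b : Int, 0 ≤ a → a ≤ n + 1 → 0 ≤ b → b ≤ n + 1 →
          pvGet2 v0 a b = if a = x ∧ b = y then 1 else 0 := by
        intro a b h1 h2 h3 h4
        rw [hv0, pvGet2_set2 n hn _ hsrep x y a b 1 hx0 hxhi hy0 hyhi h1 h2 h3 h4,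
          pvGet2_replicate]
      have hmark0 : ∀ a : Int × Int, pvInGrid n a → (pvMarked v0 a ↔ a = (x, y)) := by
        intro a hga
        obtain ⟨g1, g2, g3, g4⟩ := hga
        unfold pvMarked
        rw [hget0 a.1 a.2 (by omega) (by omega) (by omega) (by omega)]
        split_ifs with h
        · simp [Prod.ext_iff, h.1, h.2]
        · constructor
          · intro h0
            norm_num at h0
          · intro h0
            exact absurd (Prod.ext_iff.mp h0) h
      have hgr : pvInGrid n ((n, n) : Int × Int) := ⟨by omega, by omega, by omega, by omega⟩
      have hInv0 : pvInvA miro n v0 [(x, y)] := by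
        refine ⟨hs0, hb0, ?_, ?_, ?_⟩
        · intro c hgc hmc hcq
          exact absurd (by rw [(hmark0 c hgc).1 hmc]; exact List.mem_cons_self) hcq
        · intro c hc hgc
          rw [List.mem_singleton.mp hc] at hgc ⊢
          exact (hmark0 _ hgc).2 rfl
        · intro hmt
          rw [(hmark0 _ hgr).1 hmt]
          exact List.mem_cons_self
      have hμ0 : 2 * pvZeros v0 + ([((x : Int), (y : Int))] : List (Int × Int)).length
          ≤ (2 * (n + 2) * (n + 2) + 1).toNat := by
        have hz := pvZeros_le n v0 hs0
        have hcast : (2 * (n + 2) * (n + 2) + 1 : Int)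
            = ((2 * ((n + 2).toNat * (n + 2).toNat) + 1 : Nat) : Int) := by
          push_cast [Int.toNat_of_nonneg (show (0 : Int) ≤ n + 2 by omega)]
          ring
        have : (2 * (n + 2) * (n + 2) + 1).toNat
            = 2 * ((n + 2).toNat * (n + 2).toNat) + 1 := by
          rw [hcast, Int.toNat_natCast]
        rw [this]
        simp only [List.length_singleton]
        omega
      have hA : (bfs x y miro n = true) ↔ pvReach miro n [(x, y)] (n, n) := by
        show pvLoopA miro n (2 * (n + 2) * (n + 2) + 1).toNat v0 [(x, y)] = true ↔ _
        exact pvLoopA_char miro n hn _ v0 [(x, y)] hInv0 hμ0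
      -- port B
      set seedF := pvSteps.foldl
        (fun (S : List (Int × Int)) d =>
          if pvOkB miro n (x + d.1) (y + d.2) then PySem.Set.add S (x + d.1, y + d.2) else S)
        [] with hseedF
      have hseedmem : ∀ d, d ∈ seedF ↔ (d ∈ pvNbrs (x, y) ∧ pvOk miro n d) :=
        fun d => pvSeed_mem miro n x y d
      have hseednd : seedF.Nodup := pvSeed_nodup miro n x y pvSteps [] (by simp)
      have hseedok : ∀ a ∈ seedF, pvOk miro n a := fun a ha => ((hseedmem a).1 ha).2
      by_cases htgt : x = n ∧ y = n
      · have hAt : bfs x y miro n = true := by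
          rw [hA]
          refine pvReach.base _ ?_
          have : ((n, n) : Int × Int) = (x, y) := Prod.ext_iff.2 ⟨htgt.1.symm, htgt.2.symm⟩
          rw [this]
          exact List.mem_cons_self
        have hBt : bfs_alt x y miro n = true := by
          show (if x = n ∧ y = n then true else _) = true
          rw [if_pos htgt]
        rw [hAt, hBt]
      · have hB : (bfs_alt x y miro n = true) ↔ pvReach miro n seedF (n, n) := by
          show (if x = n ∧ y = n then true
            else decide ((n, n) ∈ pvLoopB miro n (n * n + 1).toNat seedF)) = true ↔ _
          rw [if_neg htgt, decide_eq_true_eq]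
          exact pvLoopB_char miro n hn seedF hseednd hseedok (n, n)
        have hbr := pvBridge miro n x y seedF hseedmem (n, n)
        have hne : ¬ (((n, n) : Int × Int) = (x, y)) := by
          intro h
          exact htgt ⟨(Prod.ext_iff.mp h).1.symm, (Prod.ext_iff.mp h).2.symm⟩
        apply pvBool_eq_of_iff
        rw [hA, hB, hbr]
        constructor
        · rintro (h | h)
          · exact absurd h hne
          · exact h
        · intro h
          exact Or.inr h
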